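-- pv_equiv track=rewrite | github.com/terry-nederveld/agent-definition-language | scripts/generate_ietf.py | escape_kramdown_syntax
-- ===== SOURCE A (Python) =====
-- def escape_kramdown_syntax(text: str) -> str:
--     """Escape patterns that conflict with kramdown-rfc syntax.
--
--     Fixes three classes of issues:
--     - [this document] and [date of publication] look like Markdown link references
--     - {{ }} inside code blocks triggers kramdown-rfc citation parsing
--     """
--     # Escape bracket expressions that are not links or citations
--     text = text.replace("[this document]", "\\[this document\\]")
--     text = text.replace("[date of publication]", "\\[date of publication\\]")
--
--     # Inside fenced code blocks, escape {{ and }} to prevent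
--     # kramdown-rfc from interpreting them as citation references.
--     # Uses ABNF-compatible hex notation: 2%x7B for {{ and 2%x7D for }}
--     lines = text.split("\n")
--     result = []
--     in_code_block = False
--     for line in lines:
--         if line.strip().startswith("```"):
--             in_code_block = not in_code_block
--             result.append(line)
--             continue
--         if in_code_block:
--             line = line.replace('"{{" ', '2%x7B ')
--             line = line.replace(' "}}"', ' 2%x7D')
--         result.append(line)
--     return "\n".join(result)
-- ===== SOURCE B (Python) =====
-- def escape_kramdown_syntax(text: str) -> str:
--     """Escape kramdown-rfc conflicting syntax (segment-based re-implementation)."""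
--     text = text.replace("[this document]", "\\[this document\\]")
--     text = text.replace("[date of publication]", "\\[date of publication\\]")
--
--     def is_fence(l):
--         return l.strip().startswith("```")
--
--     def esc(l):
--         return l.replace('"{{" ', '2%x7B ').replace(' "}}"', ' 2%x7D')
--
--     lines = text.split("\n")
--     out = []
--     code = False
--     while True:
--         k = next((i for i, l in enumerate(lines) if is_fence(l)), None)
--         if k is None:
--             out += [esc(l) for l in lines] if code else lines
--             break
--         head = lines[:k]
--         out += ([esc(l) for l in head] if code else head) + [lines[k]]
--         lines = lines[k + 1:]
--         code = not code
--     return "\n".join(out)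
-- ===== Notes on version B (the rewrite author's own statement) =====
-- stated objective: alternative
-- what changed: Replaces A's per-line loop with an in_code_block toggle by a segment decomposition: repeatedly find the next fence line, emit the whole segment before it (escaped iff it is a code segment) plus the fence, and flip the segment type; the unterminated trailing segment keeps its current type.
import Mathlib
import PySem

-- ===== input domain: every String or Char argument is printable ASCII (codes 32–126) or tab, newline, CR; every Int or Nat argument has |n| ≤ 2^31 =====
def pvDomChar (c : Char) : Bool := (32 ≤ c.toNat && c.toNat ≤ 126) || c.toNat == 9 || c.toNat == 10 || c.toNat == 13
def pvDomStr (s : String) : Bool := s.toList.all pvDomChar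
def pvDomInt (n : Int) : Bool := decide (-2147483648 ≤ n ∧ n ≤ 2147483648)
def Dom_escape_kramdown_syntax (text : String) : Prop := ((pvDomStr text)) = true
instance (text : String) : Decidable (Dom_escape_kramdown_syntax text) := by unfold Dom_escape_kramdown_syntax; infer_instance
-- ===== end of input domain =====

-- B replaces A's per-line code-block toggle by a segment decomposition: repeatedly find the
-- next fence line, emit the segment before it (escaped iff it is a code segment) and the fence,
-- and flip the segment type — an alternative decomposition, same cost.

-- shared helpers: both Pythons contain these very expressions (line.strip().startswith("```"),
-- the two {{/}} replaces); naming them once keeps the ports faithful transliterations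
def pvFence (l : String) : Bool := PySem.Str.startswith (PySem.Str.strip l) "```"

def pvEsc (l : String) : String :=
  PySem.Str.replace (PySem.Str.replace l "\"{{\" " "2%x7B ") " \"}}\"" " 2%x7D"

-- ===== PORT A =====
-- loop body of A's 'for line in lines' (same state: accumulated result list, in_code_block flag)
def pvStepA (st : List String × Bool) (line : String) : List String × Bool :=
  if pvFence line then
    (st.1 ++ [line], !st.2)
  else if st.2 then
    (st.1 ++ [pvEsc line], st.2)
  else
    (st.1 ++ [line], st.2)

def escape_kramdown_syntax (text : String) : String :=
  let text := PySem.Str.replace text "[this document]" "\\[this document\\]"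
  let text := PySem.Str.replace text "[date of publication]" "\\[date of publication\\]"
  let lines := (PySem.Str.split? text "\n").getD []
  let res := lines.foldl pvStepA ([], false)
  PySem.Str.join "\n" res.1

-- ===== PORT B =====
-- Source B's while-loop: find the next fence, emit the segment before it and the fence, flip 'code'
def pvChunks (lines : List String) (code : Bool) : List String :=
  match h : lines.findIdx? pvFence with
  | none => if code then lines.map pvEsc else lines
  | some k =>
      (if code then (lines.take k).map pvEsc else lines.take k)
        ++ lines[k]! :: pvChunks (lines.drop (k + 1)) (!code)
termination_by lines.length
decreasing_by
  have := List.findIdx?_eq_some_iff_findIdx_eq.mp h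
  simp [List.length_drop]; omega

def escape_kramdown_syntax_alt (text : String) : String :=
  let text := PySem.Str.replace text "[this document]" "\\[this document\\]"
  let text := PySem.Str.replace text "[date of publication]" "\\[date of publication\\]"
  PySem.Str.join "\n" (pvChunks ((PySem.Str.split? text "\n").getD []) false)

-- ===== PRECONDITION & SPEC =====
def Spec_escape_kramdown_syntax (text : String) (out : String) : Prop := out = escape_kramdown_syntax_alt text
instance (text : String) (out : String) : Decidable (Spec_escape_kramdown_syntax text out) := by unfold Spec_escape_kramdown_syntax; infer_instance

-- ===== CLAIM (what is proved, stated in full; the proofs are below) =====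
def Claim_equal_escape_kramdown_syntax : Prop := ∀ (text : String), Dom_escape_kramdown_syntax text → Spec_escape_kramdown_syntax text (escape_kramdown_syntax text)

-- ===== LEMMAS AND PROOFS =====
theorem pvChunks_none (ls : List String) (code : Bool) (h : ls.findIdx? pvFence = none) :
    pvChunks ls code = if code then ls.map pvEsc else ls := by
  rw [pvChunks]
  split
  · rfl
  · rename_i k heq; rw [h] at heq; cases heq

theorem pvChunks_some (ls : List String) (code : Bool) (k : Nat)
    (h : ls.findIdx? pvFence = some k) :
    pvChunks ls code = (if code then (ls.take k).map pvEsc else ls.take k)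
      ++ ls[k]! :: pvChunks (ls.drop (k + 1)) (!code) := by
  rw [pvChunks]
  split
  · rename_i heq; rw [h] at heq; cases heq
  · rename_i k' heq; rw [h] at heq; injection heq with hk; subst hk; rfl

theorem pvChunks_nil (code : Bool) : pvChunks [] code = [] := by
  rw [pvChunks_none [] code List.findIdx?_nil]
  cases code <;> simp

theorem pvChunks_fence (l : String) (ls : List String) (code : Bool) (h : pvFence l = true) :
    pvChunks (l :: ls) code = l :: pvChunks ls (!code) := by
  have hidx : List.findIdx? pvFence (l :: ls) = some 0 := by
    rw [List.findIdx?_cons]; simp [h]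
  rw [pvChunks_some _ _ _ hidx]
  simp only [List.take_zero, List.map_nil, ite_self, List.nil_append,
    List.getElem!_cons_zero, List.drop_succ_cons, List.drop_zero]

theorem pvChunks_nonfence (l : String) (ls : List String) (code : Bool) (h : pvFence l = false) :
    pvChunks (l :: ls) code = (if code then pvEsc l else l) :: pvChunks ls code := by
  cases hf : ls.findIdx? pvFence with
  | none =>
      have hidx : List.findIdx? pvFence (l :: ls) = none := by
        rw [List.findIdx?_cons]; simp [h, hf]
      rw [pvChunks_none _ _ hidx, pvChunks_none _ _ hf]
      cases code <;> simp
  | some k =>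
      have hidx : List.findIdx? pvFence (l :: ls) = some (k + 1) := by
        rw [List.findIdx?_cons]; simp [h, hf]
      rw [pvChunks_some _ _ _ hidx, pvChunks_some _ _ _ hf]
      simp only [List.take_succ_cons, List.drop_succ_cons, List.map_cons,
        List.getElem!_cons_succ]
      cases code <;> simp

theorem foldlA_eq_chunks (lines : List String) :
    ∀ (acc : List String) (code : Bool),
      (lines.foldl pvStepA (acc, code)).1 = acc ++ pvChunks lines code := by
  induction lines with
  | nil => intro acc code; simp [pvChunks_nil]
  | cons l ls ih =>
      intro acc code
      by_cases hf : pvFence l = true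
      · have hstep : pvStepA (acc, code) l = (acc ++ [l], !code) := by
          unfold pvStepA; simp [hf]
        rw [List.foldl_cons, hstep, ih, pvChunks_fence l ls code hf]
        simp
      · have hf' : pvFence l = false := by simpa using hf
        have hstep : pvStepA (acc, code) l = (acc ++ [if code then pvEsc l else l], code) := by
          unfold pvStepA; cases code <;> simp [hf']
        rw [List.foldl_cons, hstep, ih, pvChunks_nonfence l ls code hf']
        simp

-- ===== VERDICT (by name: the statement is the Claim_ definition above) =====
theorem escape_kramdown_syntax_spec : Claim_equal_escape_kramdown_syntax := by
  intro text _
  unfold Spec_escape_kramdown_syntax escape_kramdown_syntax escape_kramdown_syntax_alt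
  simp only [foldlA_eq_chunks, List.nil_append]
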